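-- pv_equiv track=rewrite | github.com/leejuyong12/python-algorithm | Baekjoon/Silver/4659-비밀번호발음하기.py | checkeo
-- ===== SOURCE A (Python) =====
-- def checkeo(text):
--     if len(text) >= 2:
--         for x in range(len(text)):
--             for y in range(x, len(text)-1):
--                 if text[y] == text[y+1]:
--                     if text[y] == text[y+1] == 'e':
--                         return True
--                     elif text[y] == text[y+1] == 'o':
--                         return True
--                     return False
-- ===== SOURCE B (Python) =====
-- def checkeo(text):
--     # Decompose into maximal runs of equal characters; judge the first run
--     # of length >= 2. Falls off the end (None) when every run has length 1,
--     # which also covers the empty and one-character strings.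
--     def drop_run(c, s):
--         n = 0
--         while n < len(s) and s[n] == c:
--             n += 1
--         return n, s[n:]
--     s = text
--     while s:
--         n, rest = drop_run(s[0], s[1:])
--         if n >= 1:
--             return s[0] in ('e', 'o')
--         s = rest
-- ===== Notes on version B (the rewrite author's own statement) =====
-- stated objective: simpler
-- what changed: Replaces the redundant quadratic nested index loops (the outer x loop never changes the answer) with a single pass that decomposes the string into maximal runs of equal characters and judges the first run of length >= 2, dropping the len>=2 guard.
import Mathlib
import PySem

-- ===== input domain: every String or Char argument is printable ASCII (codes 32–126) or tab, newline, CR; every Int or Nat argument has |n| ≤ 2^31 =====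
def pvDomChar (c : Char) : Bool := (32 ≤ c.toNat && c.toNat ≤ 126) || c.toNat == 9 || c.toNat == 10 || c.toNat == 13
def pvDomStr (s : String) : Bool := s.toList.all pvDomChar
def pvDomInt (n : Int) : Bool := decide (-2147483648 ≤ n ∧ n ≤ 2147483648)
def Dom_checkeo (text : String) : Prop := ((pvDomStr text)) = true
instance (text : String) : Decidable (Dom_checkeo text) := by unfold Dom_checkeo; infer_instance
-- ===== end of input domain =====

-- B simplifies A's redundant nested index loops into one run-decomposition pass; same return value everywhere.

-- ===== PORT A =====
-- inner loop 'for y in range(x, len(text)-1)'; indices y, y+1 are always in range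
-- there, so List.getD is exact for Python's text[y].
def checkeoInner (cs : List Char) (stop : Nat) (y : Nat) : Option (Option Bool) :=
  if y < stop then
    if cs.getD y ' ' == cs.getD (y+1) ' ' then
      if cs.getD y ' ' == 'e' then some (some true)
      else if cs.getD y ' ' == 'o' then some (some true)
      else some (some false)
    else checkeoInner cs stop (y+1)
  else none
termination_by stop - y

-- outer loop 'for x in range(len(text))'
def checkeoOuter (cs : List Char) (x : Nat) : Option Bool :=
  if x < cs.length then
    match checkeoInner cs (cs.length - 1) x with
    | some r => r
    | none => checkeoOuter cs (x+1)
  else none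
termination_by cs.length - x

def checkeo (text : String) : Option Bool :=
  let cs := text.toList
  if cs.length ≥ 2 then checkeoOuter cs 0 else none

-- ===== PORT B =====
-- drop_run: count of leading chars equal to c, and the remainder
def checkeoDropRun (c : Char) : List Char → Nat × List Char
  | [] => (0, [])
  | x :: xs => if x == c then ((checkeoDropRun c xs).1 + 1, (checkeoDropRun c xs).2) else (0, x :: xs)

theorem checkeoDropRun_len (c : Char) (xs : List Char) : (checkeoDropRun c xs).2.length ≤ xs.length := by
  induction xs with
  | nil => simp [checkeoDropRun]
  | cons x xs ih =>
    simp only [checkeoDropRun]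
    split
    · exact Nat.le_succ_of_le ih
    · simp

def checkeoCore : List Char → Option Bool
  | [] => none
  | c :: rest =>
    if (checkeoDropRun c rest).1 ≥ 1 then some (c == 'e' || c == 'o')
    else checkeoCore (checkeoDropRun c rest).2
termination_by cs => cs.length
decreasing_by
  have := checkeoDropRun_len c rest
  simp
  omega

def checkeo_alt (text : String) : Option Bool := checkeoCore text.toList

-- ===== PRECONDITION & SPEC =====
def Spec_checkeo (text : String) (out : Option Bool) : Prop := out = checkeo_alt text
instance (text : String) (out : Option Bool) : Decidable (Spec_checkeo text out) := by unfold Spec_checkeo; infer_instance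

-- ===== CLAIM (what is proved, stated in full; the proofs are below) =====
def Claim_equal_checkeo : Prop := ∀ (text : String), Dom_checkeo text → Spec_checkeo text (checkeo text)

-- ===== LEMMAS AND PROOFS =====

-- first adjacent equal pair, with A's value shape
def pairSpec : List Char → Option Bool
  | [] => none
  | [_] => none
  | a :: b :: rest =>
    if a == b then
      if a == 'e' then some true else if a == 'o' then some true else some false
    else pairSpec (b :: rest)

theorem inner_none_succ (cs : List Char) (stop y : Nat)
    (h : checkeoInner cs stop y = none) : checkeoInner cs stop (y+1) = none := by
  by_cases hy : y < stop
  · rw [checkeoInner, if_pos hy] at h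
    by_cases hp : (cs.getD y ' ' == cs.getD (y+1) ' ') = true
    · rw [if_pos hp] at h
      by_cases he : (cs.getD y ' ' == 'e') = true
      · rw [if_pos he] at h; cases h
      · rw [if_neg he] at h
        by_cases ho : (cs.getD y ' ' == 'o') = true
        · rw [if_pos ho] at h; cases h
        · rw [if_neg ho] at h; cases h
    · rwa [if_neg hp] at h
  · have h2 : ¬ y + 1 < stop := by omega
    rw [checkeoInner, if_neg h2]

theorem outer_none (cs : List Char) (x : Nat)
    (h : checkeoInner cs (cs.length - 1) x = none) : checkeoOuter cs x = none := by
  have key : ∀ n x, cs.length - x ≤ n → checkeoInner cs (cs.length - 1) x = none →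
      checkeoOuter cs x = none := by
    intro n
    induction n with
    | zero =>
      intro x hn h
      have hx : ¬ x < cs.length := by omega
      rw [checkeoOuter, if_neg hx]
    | succ n ih =>
      intro x hn h
      by_cases hx : x < cs.length
      · rw [checkeoOuter, if_pos hx, h]
        exact ih (x+1) (by omega) (inner_none_succ _ _ _ h)
      · rw [checkeoOuter, if_neg hx]
  exact key (cs.length - x) x le_rfl h

theorem inner_shift (a : Char) (cs : List Char) (stop y : Nat) :
    checkeoInner (a :: cs) (stop + 1) (y + 1) = checkeoInner cs stop y := by
  have key : ∀ n y, stop - y ≤ n →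
      checkeoInner (a :: cs) (stop + 1) (y + 1) = checkeoInner cs stop y := by
    intro n
    induction n with
    | zero =>
      intro y hn
      have h1 : ¬ y < stop := by omega
      have h2 : ¬ y + 1 < stop + 1 := by omega
      rw [checkeoInner, if_neg h2, checkeoInner, if_neg h1]
    | succ n ih =>
      intro y hn
      conv_lhs => rw [checkeoInner]
      conv_rhs => rw [checkeoInner]
      by_cases hy : y < stop
      · have hy1 : y + 1 < stop + 1 := by omega
        rw [if_pos hy1, if_pos hy]
        simp only [List.getD_cons_succ]
        by_cases hp : (cs.getD y ' ' == cs.getD (y+1) ' ') = true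
        · simp only [if_pos hp]
        · simp only [if_neg hp]
          exact ih (y+1) (by omega)
      · have hy1 : ¬ (y + 1 < stop + 1) := by omega
        rw [if_neg hy1, if_neg hy]
  exact key (stop - y) y le_rfl

theorem inner0_eq (cs : List Char) :
    checkeoInner cs (cs.length - 1) 0 = (pairSpec cs).map some := by
  induction cs with
  | nil =>
    have h : ¬ (0 < ([] : List Char).length - 1) := by simp
    rw [checkeoInner, if_neg h]; rfl
  | cons a cs' ih =>
    cases cs' with
    | nil =>
      have h : ¬ (0 < ([a] : List Char).length - 1) := by simp
      rw [checkeoInner, if_neg h]; rfl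
    | cons b rest =>
      conv_lhs => rw [checkeoInner]
      have hlen : (a :: b :: rest : List Char).length - 1 = rest.length + 1 := by simp
      simp only [hlen]
      have h0 : 0 < rest.length + 1 := by omega
      rw [if_pos h0]
      simp only [List.getD_cons_zero, List.getD_cons_succ]
      by_cases hp : (a == b) = true
      · rw [if_pos hp]
        conv_rhs => rw [pairSpec]
        rw [if_pos hp]
        by_cases he : (a == 'e') = true
        · rw [if_pos he, if_pos he]; rfl
        · rw [if_neg he, if_neg he]
          by_cases ho : (a == 'o') = true
          · rw [if_pos ho, if_pos ho]; rfl
          · rw [if_neg ho, if_neg ho]; rfl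
      · rw [if_neg hp]
        have hsh : checkeoInner (a :: b :: rest) (rest.length + 1) (0 + 1)
            = checkeoInner (b :: rest) rest.length 0 := inner_shift a (b :: rest) rest.length 0
        rw [hsh]
        have hlen2 : (b :: rest : List Char).length - 1 = rest.length := by simp
        rw [hlen2] at ih
        rw [ih]
        conv_rhs => rw [pairSpec]
        rw [if_neg hp]

theorem outer0_eq (cs : List Char) (h : 1 ≤ cs.length) :
    checkeoOuter cs 0 = pairSpec cs := by
  rw [checkeoOuter, if_pos (by omega : 0 < cs.length), inner0_eq]
  cases hps : pairSpec cs with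
  | some b => rfl
  | none =>
    show checkeoOuter cs 1 = none
    exact outer_none cs 1 (inner_none_succ _ _ _ (by rw [inner0_eq, hps]; rfl))

theorem core_eq (cs : List Char) : checkeoCore cs = pairSpec cs := by
  induction cs with
  | nil => rw [checkeoCore]; rfl
  | cons a cs' ih =>
    cases cs' with
    | nil =>
      rw [checkeoCore]
      have h0 : ¬ ((checkeoDropRun a []).1 ≥ 1) := by simp [checkeoDropRun]
      rw [if_neg h0]
      have h2 : (checkeoDropRun a []).2 = [] := rfl
      rw [h2, checkeoCore]
      rfl
    | cons b rest =>
      rw [checkeoCore]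
      by_cases hp : (b == a) = true
      · have hp' : (a == b) = true := by
          simp only [beq_iff_eq] at hp ⊢; exact hp.symm
        have hd : checkeoDropRun a (b :: rest)
            = ((checkeoDropRun a rest).1 + 1, (checkeoDropRun a rest).2) := by
          rw [checkeoDropRun, if_pos hp]
        rw [hd]
        have h1 : ((checkeoDropRun a rest).1 + 1, (checkeoDropRun a rest).2).1 ≥ 1 := by
          simp
        rw [if_pos h1]
        conv_rhs => rw [pairSpec]
        rw [if_pos hp']
        by_cases he : (a == 'e') = true
        · rw [if_pos he]
          simp only [beq_iff_eq] at he
          simp [he]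
        · rw [if_neg he]
          by_cases ho : (a == 'o') = true
          · rw [if_pos ho]
            simp only [beq_iff_eq] at ho
            simp [ho]
          · rw [if_neg ho]
            simp only [beq_iff_eq] at he ho
            simp [he, ho]
      · have hp' : ¬ ((a == b) = true) := by
          simp only [beq_iff_eq] at hp ⊢; exact fun e => hp e.symm
        have hd : checkeoDropRun a (b :: rest) = (0, b :: rest) := by
          rw [checkeoDropRun, if_neg hp]
        rw [hd]
        have h0 : ¬ (((0, b :: rest) : Nat × List Char).1 ≥ 1) := by simp
        rw [if_neg h0]
        have h2 : ((0, b :: rest) : Nat × List Char).2 = b :: rest := rfl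
        rw [h2, ih]
        conv_rhs => rw [pairSpec]
        rw [if_neg hp']

-- ===== VERDICT (by name: the statement is the Claim_ definition above) =====
theorem checkeo_spec : Claim_equal_checkeo := by
  intro text _
  show checkeo text = checkeo_alt text
  simp only [checkeo, checkeo_alt]
  rw [core_eq]
  by_cases h : text.toList.length ≥ 2
  · rw [if_pos h]
    exact outer0_eq _ (by omega)
  · rw [if_neg h]
    cases hc : text.toList with
    | nil => rfl
    | cons a tl =>
      cases tl with
      | nil => rfl
      | cons b rest => rw [hc] at h; simp at h
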